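-- pv_equiv track=rewrite | github.com/wlruys/task4feedback | src/task4feedback/ml/models.py | _compute_num_downsampling_layers
-- ===== SOURCE A (Python) =====
-- def _compute_num_downsampling_layers(length: int, width: int, minimum_resolution: int) -> int:
--     """
--     Compute the number of 2x downsamplings (H,W -> floor(H/2), floor(W/2)) such that
--     we never reduce the MIN side below `minimum_resolution` on the *next* pool.
--     Works for rectangular/non-power-of-two sizes.
--     """
--     h, w = int(length), int(width)
--     layers = 0
--     while min(h, w) >= 2 * minimum_resolution:
--         h //= 2
--         w //= 2
--         layers += 1
--     return layers
-- ===== SOURCE B (Python) =====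
-- def _compute_num_downsampling_layers(length: int, width: int, minimum_resolution: int) -> int:
--     # closed form: number of floor-halvings of m = min side while it stays >= 2*minimum_resolution
--     m = min(int(length), int(width))
--     t = 2 * minimum_resolution
--     if m < t:
--         return 0
--     return (m // t).bit_length()
-- ===== Notes on version B (the rewrite author's own statement) =====
-- stated objective: simpler
-- what changed: Replaces A's while-loop that halves both sides with a closed-form answer: m = min side, return (m // (2*minimum_resolution)).bit_length() (0 if m < 2*minimum_resolution).
import Mathlib
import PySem

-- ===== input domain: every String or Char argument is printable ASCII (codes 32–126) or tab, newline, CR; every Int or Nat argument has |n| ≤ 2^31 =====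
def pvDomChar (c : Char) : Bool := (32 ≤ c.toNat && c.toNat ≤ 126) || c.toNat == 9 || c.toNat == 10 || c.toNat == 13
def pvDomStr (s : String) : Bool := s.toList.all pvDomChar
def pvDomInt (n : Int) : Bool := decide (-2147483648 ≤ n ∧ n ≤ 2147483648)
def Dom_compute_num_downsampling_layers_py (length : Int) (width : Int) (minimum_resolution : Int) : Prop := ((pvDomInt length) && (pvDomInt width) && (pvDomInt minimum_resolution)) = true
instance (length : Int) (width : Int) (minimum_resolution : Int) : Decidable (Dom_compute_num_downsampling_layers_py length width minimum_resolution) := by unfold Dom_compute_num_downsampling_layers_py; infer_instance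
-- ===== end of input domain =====

-- B replaces A's halving while-loop by a closed-form bit_length expression (objective: simpler).

-- ===== PORT A =====
-- the while-loop of A; fuel only makes it total (64 is proved sufficient on Dom ∩ Pre_)
def pyLoopA (R : Int) : Nat → Int → Int → Int → Int
  | 0, _, _, layers => layers
  | fuel + 1, h, w, layers =>
      if 2 * R ≤ min h w then
        pyLoopA R fuel (PySem.Int.floordiv h 2) (PySem.Int.floordiv w 2) (layers + 1)
      else layers

def compute_num_downsampling_layers_py (length : Int) (width : Int) (minimum_resolution : Int) : Int :=
  pyLoopA minimum_resolution 64 length width 0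

-- ===== PORT B =====
def compute_num_downsampling_layers_py_alt (length : Int) (width : Int) (minimum_resolution : Int) : Int :=
  let m := min length width
  let t := 2 * minimum_resolution
  if m < t then 0
  else (PySem.Int.bitLength (PySem.Int.floordiv m t) : Int)

-- ===== PRECONDITION & SPEC =====
-- Pre_ excludes exactly the inputs on which A's while-loop never terminates:
-- whenever minimum_resolution ≤ 0 and the initial min side is ≥ 2*minimum_resolution,
-- the halved sides converge to 0 / -1 and the loop condition stays true forever.
def Pre_compute_num_downsampling_layers_py (length : Int) (width : Int) (minimum_resolution : Int) : Prop :=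
  1 ≤ minimum_resolution ∨ min length width < 2 * minimum_resolution
instance (length : Int) (width : Int) (minimum_resolution : Int) : Decidable (Pre_compute_num_downsampling_layers_py length width minimum_resolution) := by unfold Pre_compute_num_downsampling_layers_py; infer_instance

def pvWitness_compute_num_downsampling_layers_py : Int × Int × Int := (64, 64, 1)

def Spec_compute_num_downsampling_layers_py (length : Int) (width : Int) (minimum_resolution : Int) (out : Int) : Prop := out = compute_num_downsampling_layers_py_alt length width minimum_resolution
instance (length : Int) (width : Int) (minimum_resolution : Int) (out : Int) : Decidable (Spec_compute_num_downsampling_layers_py length width minimum_resolution out) := by unfold Spec_compute_num_downsampling_layers_py; infer_instance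

-- ===== CLAIM (what is proved, stated in full; the proofs are below) =====
def Claim_equal_compute_num_downsampling_layers_py : Prop := ∀ (length : Int) (width : Int) (minimum_resolution : Int), Dom_compute_num_downsampling_layers_py length width minimum_resolution → Pre_compute_num_downsampling_layers_py length width minimum_resolution → Spec_compute_num_downsampling_layers_py length width minimum_resolution (compute_num_downsampling_layers_py length width minimum_resolution)

-- ===== LEMMAS AND PROOFS =====

-- closed form as a function of the min side
def pvG (R m : Int) : Int :=
  if m < 2 * R then 0 else (PySem.Int.bitLength (PySem.Int.floordiv m (2 * R)) : Int)

lemma pvG_step (R m : Int) (hR : 1 ≤ R) (hm : 2 * R ≤ m) :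
    pvG R m = pvG R (m / 2) + 1 := by
  have ht : (0 : Int) < 2 * R := by omega
  have hfd : PySem.Int.floordiv m (2 * R) = m / (2 * R) :=
    PySem.Int.floordiv_eq_ediv_of_pos ht
  set q : Int := m / (2 * R) with hq
  have hq1 : 1 ≤ q := by
    rw [hq, Int.le_ediv_iff_mul_le ht]; omega
  have hbl : PySem.Int.bitLength q = PySem.Int.bitLength (PySem.Int.floordiv q 2) + 1 :=
    PySem.Int.bitLength_of_pos (by omega)
  have hfd2 : PySem.Int.floordiv q 2 = q / 2 :=
    PySem.Int.floordiv_eq_ediv_of_pos (by omega)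
  by_cases hhalf : m / 2 < 2 * R
  · -- one more halving leaves the loop: q = 1
    have hm4 : m < 2 * (2 * R) := by omega
    have hq2 : q < 2 := by rw [hq, Int.ediv_lt_iff_lt_mul ht]; omega
    have hqe : q = 1 := by omega
    simp [pvG, hhalf, hm.not_gt, hfd, hqe]
    decide
  · -- still in: (m/2)/(2R) = q/2
    replace hhalf : 2 * R ≤ m / 2 := by omega
    have hdd : m / 2 / (2 * R) = q / 2 := by
      rw [hq, Int.ediv_ediv_of_nonneg (by omega : (0:Int) ≤ 2),
        Int.ediv_ediv_of_nonneg (by omega : (0:Int) ≤ 2 * R), mul_comm]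
    have hfd3 : PySem.Int.floordiv (m / 2) (2 * R) = m / 2 / (2 * R) :=
      PySem.Int.floordiv_eq_ediv_of_pos ht
    simp [pvG, hm.not_gt, hhalf.not_gt, hfd, hfd3, hdd, hbl]

lemma pvLoop_eq (R : Int) (hR : 1 ≤ R) :
    ∀ (fuel : Nat) (h w layers : Int), min h w < 2 * R * 2 ^ fuel →
      pyLoopA R fuel h w layers = layers + pvG R (min h w) := by
  intro fuel
  induction fuel with
  | zero =>
      intro h w layers hb
      simp only [pow_zero, mul_one] at hb
      simp [pyLoopA, pvG, hb]
  | succ f ih =>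
      intro h w layers hb
      by_cases hc : 2 * R ≤ min h w
      · have h2 : PySem.Int.floordiv h 2 = h / 2 :=
          PySem.Int.floordiv_eq_ediv_of_pos (by omega)
        have w2 : PySem.Int.floordiv w 2 = w / 2 :=
          PySem.Int.floordiv_eq_ediv_of_pos (by omega)
        have hmin : min (h / 2) (w / 2) = (min h w) / 2 := by omega
        have hK : min h w < 2 * (2 * R * 2 ^ f) := by
          have : (2 : Int) * R * 2 ^ (f + 1) = 2 * (2 * R * 2 ^ f) := by ring
          omega
        have hb' : min (h / 2) (w / 2) < 2 * R * 2 ^ f := by omega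
        rw [show pyLoopA R (f + 1) h w layers =
              pyLoopA R f (PySem.Int.floordiv h 2) (PySem.Int.floordiv w 2) (layers + 1)
            from by simp [pyLoopA, hc]]
        rw [h2, w2, ih _ _ _ hb', hmin, pvG_step R (min h w) hR hc]
        ring
      · replace hc : min h w < 2 * R := by omega
        simp [pyLoopA, hc.not_ge, pvG, hc]

-- ===== VERDICT (by name: the statement is the Claim_ definition above) =====
theorem compute_num_downsampling_layers_py_spec : Claim_equal_compute_num_downsampling_layers_py := by
  intro L W R hdom hpre
  unfold Spec_compute_num_downsampling_layers_py
  unfold compute_num_downsampling_layers_py compute_num_downsampling_layers_py_alt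
  have halt : (if min L W < 2 * R then (0 : Int)
      else (PySem.Int.bitLength (PySem.Int.floordiv (min L W) (2 * R)) : Int)) = pvG R (min L W) := by
    simp [pvG]
  simp only []
  rw [halt]
  rcases hpre with hR | hsmall
  · have hdomL : -2147483648 ≤ L ∧ L ≤ 2147483648 := by
      simp [Dom_compute_num_downsampling_layers_py, pvDomInt] at hdom; omega
    have hb : min L W < 2 * R * 2 ^ (64 : Nat) := by
      have h64 : (2 : Int) ^ (64 : Nat) = 18446744073709551616 := by norm_num
      have : 2 * R * 2 ^ (64 : Nat) ≥ 2 * 2 ^ (64 : Nat) := by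
        have h0 : (0 : Int) < 2 ^ (64 : Nat) := by positivity
        nlinarith
      omega
    rw [pvLoop_eq R hR 64 L W 0 hb]
    omega
  · -- loop body never entered; both sides are 0
    have : ¬ (2 * R ≤ min L W) := by omega
    simp [pyLoopA, this, pvG, hsmall]
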